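-- pv_equiv track=rewrite | github.com/herbstluftwm/herbstluftwm | python/herbstluftwm/__init__.py | chain
-- ===== SOURCE A (Python) =====
-- from typing import List
--
-- def chain(chain_cmd, commands: List[List[str]]) -> List[str]:
--     """return a composed command that executes
--     the commands given in the list. chain_cmd is one of:
--       - chain
--       - and
--       - or
--     """
--     def separator_clashes(separator_name):
--         for cmd in commands:
--             if separator_name in cmd:
--                 return True
--         return False
--     # find a token that does not occur in any of the commands
--     separator_num = 0
--     while separator_clashes(f'S{separator_num}'):
--         separator_num += 1
--     separator = f'S{separator_num}'
--     # create the composed command using the separator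
--     full_command = [chain_cmd]
--     for cmd in commands:
--         full_command += [separator] + cmd
--     return full_command
-- ===== SOURCE B (Python) =====
-- from typing import List
--
--
-- def _sep_index(token):
--     """Return n if token is exactly 'S' + canonical decimal of n, else None."""
--     if not token.startswith('S'):
--         return None
--     rest = token[1:]
--     if not rest.isdigit():
--         return None
--     if len(rest) != 1 and rest[0] == '0':
--         return None
--     n = 0
--     for ch in rest:
--         n = 10 * n + (ord(ch) - 48)
--     return n
--
--
-- def chain(chain_cmd, commands: List[List[str]]) -> List[str]:
--     # one pass: collect the set of indices n whose token 'S{n}' already occurs,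
--     # then the separator index is the minimum excludant of that set
--     used = set()
--     for cmd in commands:
--         for token in cmd:
--             idx = _sep_index(token)
--             if idx is not None:
--                 used.add(idx)
--     num = 0
--     while num in used:
--         num += 1
--     separator = 'S' + str(num)
--     full_command = [chain_cmd]
--     for cmd in commands:
--         full_command.append(separator)
--         full_command.extend(cmd)
--     return full_command
-- ===== Notes on version B (the rewrite author's own statement) =====
-- stated objective: alternative
-- what changed: A probes candidate separators S0,S1,... and rescans every command for each candidate; B makes one pass over all tokens, parses each token of the exact form 'S'+canonical decimal to collect the set of used separator indices, and then takes the minimum excludant of that set as the separator index.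
import Mathlib
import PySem

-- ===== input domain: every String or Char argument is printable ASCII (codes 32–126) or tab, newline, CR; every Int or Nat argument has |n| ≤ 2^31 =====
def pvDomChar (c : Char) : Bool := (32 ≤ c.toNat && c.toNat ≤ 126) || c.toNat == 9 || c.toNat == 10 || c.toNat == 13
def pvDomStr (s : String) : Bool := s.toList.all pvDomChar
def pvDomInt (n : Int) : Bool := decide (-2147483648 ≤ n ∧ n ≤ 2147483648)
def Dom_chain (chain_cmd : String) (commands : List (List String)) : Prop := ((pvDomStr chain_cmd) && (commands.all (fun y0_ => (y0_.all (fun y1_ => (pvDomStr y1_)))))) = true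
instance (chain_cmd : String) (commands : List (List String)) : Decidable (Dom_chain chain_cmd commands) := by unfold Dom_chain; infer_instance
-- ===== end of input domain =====

-- B replaces A's "probe candidate separators, rescanning all commands for each" by a single pass
-- extracting the set of used S-indices followed by a minimum-excludant scan (alternative algorithm).

-- ===== PORT A =====
-- inner function separator_clashes: 'for cmd in commands: if separator_name in cmd: return True'
def chainSepClashes (separator_name : String) : List (List String) → Bool
  | [] => false
  | cmd :: rest => if separator_name ∈ cmd then true else chainSepClashes separator_name rest

-- 'while separator_clashes(f"S{separator_num}"): separator_num += 1'.  The fuel argument only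
-- makes the recursion total; chainFindNum_eq below shows the fuel passed by `chain` never runs out.
def chainFindNum (commands : List (List String)) : Nat → Nat → Nat
  | 0, separator_num => separator_num
  | fuel + 1, separator_num =>
    if chainSepClashes ("S" ++ PySem.Int.toStr (separator_num : Int)) commands then
      chainFindNum commands fuel (separator_num + 1)
    else separator_num

def chain (chain_cmd : String) (commands : List (List String)) : List String :=
  let separator_num := chainFindNum commands ((commands.map List.length).sum + 1) 0
  let separator := "S" ++ PySem.Int.toStr (separator_num : Int)
  commands.foldl (fun full_command cmd => full_command ++ ([separator] ++ cmd)) [chain_cmd]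

-- ===== PORT B =====
-- helper _sep_index: some n iff token equals 'S' + canonical decimal of n
def chainSepIndex? (token : String) : Option Nat :=
  if PySem.Chars.startswith token.toList ['S'] then
    let rest := token.toList.drop 1                 -- token[1:]
    if PySem.Chars.strIsdigit rest then
      if rest.length ≠ 1 ∧ rest.headD ' ' = '0' then none
      else some (rest.foldl (fun n ch => 10 * n + (ch.toNat - 48)) 0)
    else none
  else none

-- one pass over all tokens, collecting the used S-indices into a set
def chainUsed (commands : List (List String)) : PySem.Set Nat :=
  commands.foldl (fun used cmd =>
    cmd.foldl (fun used token =>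
      match chainSepIndex? token with
      | some idx => PySem.Set.add used idx
      | none => used) used) PySem.Set.empty

-- 'while num in used: num += 1'.  Fuel only for totality; chainMex_eq shows it suffices.
def chainMex (used : PySem.Set Nat) : Nat → Nat → Nat
  | 0, num => num
  | fuel + 1, num => if used.contains num then chainMex used fuel (num + 1) else num

def chain_alt (chain_cmd : String) (commands : List (List String)) : List String :=
  let used := chainUsed commands
  let num := chainMex used (used.length + 1) 0
  let separator := "S" ++ PySem.Int.toStr (num : Int)
  commands.foldl (fun full_command cmd => (full_command ++ [separator]) ++ cmd) [chain_cmd]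

-- ===== PRECONDITION & SPEC =====
def Spec_chain (chain_cmd : String) (commands : List (List String)) (out : List String) : Prop := out = chain_alt chain_cmd commands
instance (chain_cmd : String) (commands : List (List String)) (out : List String) : Decidable (Spec_chain chain_cmd commands out) := by unfold Spec_chain; infer_instance

-- ===== CLAIM (what is proved, stated in full; the proofs are below) =====
def Claim_equal_chain : Prop := ∀ (chain_cmd : String) (commands : List (List String)), Dom_chain chain_cmd commands → Spec_chain chain_cmd commands (chain chain_cmd commands)

-- ===== LEMMAS AND PROOFS =====

-- canonical decimal digit string of n, built most-significant-first
def chainRep (n : Nat) : List Char :=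
  if h : n < 10 then [Nat.digitChar n]
  else chainRep (n / 10) ++ [Nat.digitChar (n % 10)]
decreasing_by exact Nat.div_lt_self (by omega) (by omega)

lemma chainRep_toDigitsCore : ∀ (f n : Nat) (l : List Char), n < f →
    Nat.toDigitsCore 10 f n l = chainRep n ++ l := by
  intro f
  induction f with
  | zero => intro n l h; omega
  | succ f ih =>
    intro n l hnf
    simp only [Nat.toDigitsCore]
    by_cases h10 : n / 10 = 0
    · have hn : n < 10 := by omega
      rw [chainRep, dif_pos hn]
      simp [h10, Nat.mod_eq_of_lt hn]
    · have hn : ¬ n < 10 := by omega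
      rw [if_neg h10, ih (n / 10) _ (by omega)]
      conv_rhs => rw [chainRep]
      rw [dif_neg hn]
      simp

lemma chainRep_toChars (n : Nat) : PySem.Int.toChars (n : Int) = chainRep n := by
  simp only [PySem.Int.toChars]
  rw [if_neg (by omega)]
  simp only [Int.toNat_natCast, Nat.toDigits]
  rw [chainRep_toDigitsCore (n + 1) n [] (by omega), List.append_nil]

lemma chain_digitChar_toNat (d : Nat) (h : d < 10) : (Nat.digitChar d).toNat = d + 48 := by
  interval_cases d <;> rfl

lemma chain_isdigit_digitChar (d : Nat) (h : d < 10) : PySem.Chars.isdigit (Nat.digitChar d) = true := by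
  interval_cases d <;> rfl

lemma chain_isdigit_bounds (c : Char) (h : PySem.Chars.isdigit c = true) :
    48 ≤ c.toNat ∧ c.toNat ≤ 57 := by
  simp [PySem.Chars.isdigit, Char.le_def] at h
  exact ⟨h.1, h.2⟩

lemma chain_digitChar_dval (c : Char) (h : PySem.Chars.isdigit c = true) :
    Nat.digitChar (c.toNat - 48) = c := by
  obtain ⟨h1, h2⟩ := chain_isdigit_bounds c h
  apply Char.ext
  apply UInt32.toNat_inj.mp
  have : (Nat.digitChar (c.toNat - 48)).toNat = (c.toNat - 48) + 48 :=
    chain_digitChar_toNat _ (by omega)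
  change (Nat.digitChar (c.toNat - 48)).toNat = c.toNat
  omega

-- the fold B uses to read the decimal value
def chainVal (cs : List Char) : Nat := cs.foldl (fun n ch => 10 * n + (ch.toNat - 48)) 0

lemma chainVal_append (cs : List Char) (c : Char) :
    chainVal (cs ++ [c]) = 10 * chainVal cs + (c.toNat - 48) := by
  simp [chainVal, List.foldl_append]

lemma chainVal_rep (n : Nat) : chainVal (chainRep n) = n := by
  induction n using Nat.strong_induction_on with
  | _ n ih =>
    by_cases h : n < 10
    · rw [chainRep, dif_pos h]
      simp [chainVal, chain_digitChar_toNat n h]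
    · rw [chainRep, dif_neg h, chainVal_append, ih (n / 10) (Nat.div_lt_self (by omega) (by omega)),
        chain_digitChar_toNat (n % 10) (by omega)]
      omega

lemma chainRep_digits (n : Nat) : ∀ c ∈ chainRep n, PySem.Chars.isdigit c = true := by
  induction n using Nat.strong_induction_on with
  | _ n ih =>
    by_cases h : n < 10
    · rw [chainRep, dif_pos h]
      intro c hc
      simp at hc
      subst hc
      exact chain_isdigit_digitChar n h
    · rw [chainRep, dif_neg h]
      intro c hc
      rcases List.mem_append.mp hc with hc | hc
      · exact ih (n / 10) (Nat.div_lt_self (by omega) (by omega)) c hc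
      · simp at hc
        subst hc
        exact chain_isdigit_digitChar _ (by omega)

lemma chainRep_ne_nil (n : Nat) : chainRep n ≠ [] := by
  by_cases h : n < 10
  · rw [chainRep, dif_pos h]; simp
  · rw [chainRep, dif_neg h]; simp

lemma chain_headD_append (l l' : List Char) (h : l ≠ []) : (l ++ l').headD ' ' = l.headD ' ' := by
  cases l with
  | nil => exact absurd rfl h
  | cons c cs => rfl

lemma chainRep_head (n : Nat) (h : 1 ≤ n) : (chainRep n).headD ' ' ≠ '0' := by
  induction n using Nat.strong_induction_on with
  | _ n ih =>
    by_cases h10 : n < 10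
    · rw [chainRep, dif_pos h10]
      interval_cases n <;> decide
    · rw [chainRep, dif_neg h10, chain_headD_append _ _ (chainRep_ne_nil _)]
      exact ih (n / 10) (Nat.div_lt_self (by omega) (by omega)) (by omega)

lemma chainRep_canonical (n : Nat) : (chainRep n).length = 1 ∨ (chainRep n).headD ' ' ≠ '0' := by
  by_cases h : n < 10
  · left; rw [chainRep, dif_pos h]; rfl
  · right; exact chainRep_head n (by omega)

lemma chainVal_foldl_mono (cs : List Char) : ∀ a : Nat,
    a ≤ cs.foldl (fun n ch => 10 * n + (ch.toNat - 48)) a := by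
  induction cs with
  | nil => intro a; simp
  | cons c cs ih =>
    intro a
    simp only [List.foldl_cons]
    exact le_trans (by omega) (ih (10 * a + (c.toNat - 48)))

lemma chainVal_pos (cs : List Char) (hne : cs ≠ [])
    (hd : ∀ c ∈ cs, PySem.Chars.isdigit c = true) (hh : cs.headD ' ' ≠ '0') :
    1 ≤ chainVal cs := by
  cases cs with
  | nil => exact absurd rfl hne
  | cons c cs =>
    have hc := chain_isdigit_bounds c (hd c (by simp))
    have hc0 : c.toNat ≠ 48 := by
      intro hcn
      apply hh
      have : c = '0' := by
        apply Char.ext; apply UInt32.toNat_inj.mp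
        change c.toNat = 48
        exact hcn
      simp [this]
    have h1 : 1 ≤ c.toNat - 48 := by omega
    calc 1 ≤ 10 * 0 + (c.toNat - 48) := by omega
    _ ≤ chainVal (c :: cs) := by
        simp only [chainVal, List.foldl_cons]
        exact chainVal_foldl_mono cs _

-- uniqueness: a canonical digit string is chainRep of its value
lemma chainRep_of_canonical : ∀ (cs : List Char), cs ≠ [] →
    (∀ c ∈ cs, PySem.Chars.isdigit c = true) →
    (cs.length = 1 ∨ cs.headD ' ' ≠ '0') →
    chainRep (chainVal cs) = cs := by
  intro cs
  induction cs using List.reverseRecOn with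
  | nil => intro h; exact absurd rfl h
  | append_singleton ds c ih =>
    intro _ hd hcan
    have hc := chain_isdigit_bounds c (hd c (by simp))
    cases ds with
    | nil =>
      have : chainVal [c] = c.toNat - 48 := by simp [chainVal]
      rw [show ([] : List Char) ++ [c] = [c] from rfl] at *
      rw [this, chainRep, dif_pos (by omega)]
      rw [chain_digitChar_dval c (hd c (by simp))]
    | cons d ds' =>
      have hne : (d :: ds') ≠ ([] : List Char) := by simp
      have hdds : ∀ x ∈ (d :: ds'), PySem.Chars.isdigit x = true := by
        intro x hx; apply hd x; simp at hx ⊢; tauto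
      have hhead : (d :: ds').headD ' ' ≠ '0' := by
        rcases hcan with hlen | hh
        · simp at hlen
        · rwa [chain_headD_append _ _ hne] at hh
      have hval1 : 1 ≤ chainVal (d :: ds') := chainVal_pos _ hne hdds hhead
      have hvapp := chainVal_append (d :: ds') c
      have hcanon' : (d :: ds').length = 1 ∨ (d :: ds').headD ' ' ≠ '0' := Or.inr hhead
      have ihds := ih hne hdds hcanon'
      rw [hvapp, chainRep, dif_neg (by omega)]
      have hdiv : (10 * chainVal (d :: ds') + (c.toNat - 48)) / 10 = chainVal (d :: ds') := by omega
      have hmod : (10 * chainVal (d :: ds') + (c.toNat - 48)) % 10 = c.toNat - 48 := by omega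
      rw [hdiv, hmod, ihds, chain_digitChar_dval c (hd c (by simp))]

-- characterisation of B's token parser
lemma chainSepIndex?_eq_some_iff (token : String) (n : Nat) :
    chainSepIndex? token = some n ↔ token = "S" ++ PySem.Int.toStr (n : Int) := by
  have htl : (("S" : String) ++ PySem.Int.toStr (n : Int)).toList = 'S' :: chainRep n := by
    rw [String.toList_append, PySem.Int.toList_toStr, chainRep_toChars]
    rfl
  rw [← String.toList_inj, htl]
  constructor
  · intro h
    unfold chainSepIndex? at h
    by_cases hsw : PySem.Chars.startswith token.toList ['S'] = true
    · rw [if_pos hsw] at h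
      cases htok : token.toList with
      | nil => rw [htok] at hsw; simp [PySem.Chars.startswith] at hsw
      | cons c cs =>
        have hcS : c = 'S' := by
          rw [htok] at hsw
          simp [PySem.Chars.startswith, List.isPrefixOf] at hsw
          exact hsw.symm
        rw [htok] at h
        simp only [List.drop_succ_cons, List.drop_zero] at h
        by_cases hdig : PySem.Chars.strIsdigit cs = true
        · rw [if_pos hdig] at h
          by_cases hlead : cs.length ≠ 1 ∧ cs.headD ' ' = '0'
          · rw [if_pos hlead] at h; exact absurd h (by simp)
          · rw [if_neg hlead] at h
            have hval : chainVal cs = n := by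
              simpa [chainVal] using h
            have hne : cs ≠ [] := by
              intro hnil
              rw [hnil] at hdig
              simp [PySem.Chars.strIsdigit] at hdig
            have hall : ∀ x ∈ cs, PySem.Chars.isdigit x = true := by
              intro x hx
              have := (by simpa [PySem.Chars.strIsdigit, List.all_eq_true] using hdig : _ ∧ _).2
              exact this x hx
            have hcanon : cs.length = 1 ∨ cs.headD ' ' ≠ '0' := by
              by_cases h1 : cs.length = 1
              · exact Or.inl h1
              · right; intro hh; exact hlead ⟨h1, hh⟩
            rw [hcS, ← hval, chainRep_of_canonical cs hne hall hcanon]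
        · rw [if_neg hdig] at h; exact absurd h (by simp)
    · rw [if_neg hsw] at h; exact absurd h (by simp)
  · intro h
    unfold chainSepIndex?
    rw [h]
    have hsw : PySem.Chars.startswith ('S' :: chainRep n) ['S'] = true := by
      simp [PySem.Chars.startswith, List.isPrefixOf]
    rw [if_pos hsw]
    simp only [List.drop_succ_cons, List.drop_zero]
    have hdig : PySem.Chars.strIsdigit (chainRep n) = true := by
      simp only [PySem.Chars.strIsdigit, Bool.and_eq_true, Bool.not_eq_true', List.isEmpty_eq_false_iff,
        List.all_eq_true]
      exact ⟨chainRep_ne_nil n, fun c hc => chainRep_digits n c hc⟩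
    rw [if_pos hdig]
    have hlead : ¬ ((chainRep n).length ≠ 1 ∧ (chainRep n).headD ' ' = '0') := by
      rcases chainRep_canonical n with h1 | hh
      · intro hx; exact hx.1 h1
      · intro hx; exact hh hx.2
    rw [if_neg hlead]
    have := chainVal_rep n
    simp only [chainVal] at this
    rw [this]

-- A's clash test says: some command contains the separator
lemma chainSepClashes_iff (sep : String) (commands : List (List String)) :
    chainSepClashes sep commands = true ↔ ∃ cmd ∈ commands, sep ∈ cmd := by
  induction commands with
  | nil => simp [chainSepClashes]
  | cons cmd rest ih =>
    simp only [chainSepClashes]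
    by_cases h : sep ∈ cmd
    · simp [h]
    · rw [if_neg h, ih]
      constructor
      · rintro ⟨c, hc, hs⟩; exact ⟨c, by simp [hc], hs⟩
      · rintro ⟨c, hc, hs⟩
        rcases List.mem_cons.mp hc with rfl | hc
        · exact absurd hs h
        · exact ⟨c, hc, hs⟩

-- membership in B's set of used indices
lemma chainUsed_inner_mem (cmd : List String) : ∀ (s : PySem.Set Nat) (v : Nat),
    (v ∈ cmd.foldl (fun used token =>
      match chainSepIndex? token with
      | some idx => PySem.Set.add used idx
      | none => used) s) ↔ v ∈ s ∨ ∃ tok ∈ cmd, chainSepIndex? tok = some v := by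
  induction cmd with
  | nil => simp
  | cons tok rest ih =>
    intro s v
    simp only [List.foldl_cons]
    cases hp : chainSepIndex? tok with
    | none =>
      rw [ih]
      constructor
      · rintro (hv | ⟨t, ht, hs⟩)
        · exact Or.inl hv
        · exact Or.inr ⟨t, by simp [ht], hs⟩
      · rintro (hv | ⟨t, ht, hs⟩)
        · exact Or.inl hv
        · rcases List.mem_cons.mp ht with rfl | ht
          · rw [hp] at hs; exact absurd hs (by simp)
          · exact Or.inr ⟨t, ht, hs⟩
    | some idx =>
      rw [ih]
      rw [PySem.Set.mem_add]
      constructor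
      · rintro ((hv | rfl) | ⟨t, ht, hs⟩)
        · exact Or.inl hv
        · exact Or.inr ⟨tok, by simp, hp⟩
        · exact Or.inr ⟨t, by simp [ht], hs⟩
      · rintro (hv | ⟨t, ht, hs⟩)
        · exact Or.inl (Or.inl hv)
        · rcases List.mem_cons.mp ht with rfl | ht
          · rw [hp] at hs
            exact Or.inl (Or.inr (by simpa using hs.symm))
          · exact Or.inr ⟨t, ht, hs⟩

lemma chainUsed_outer_mem (commands : List (List String)) : ∀ (s : PySem.Set Nat) (v : Nat),
    (v ∈ commands.foldl (fun used cmd =>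
      cmd.foldl (fun used token =>
        match chainSepIndex? token with
        | some idx => PySem.Set.add used idx
        | none => used) used) s) ↔
      v ∈ s ∨ ∃ cmd ∈ commands, ∃ tok ∈ cmd, chainSepIndex? tok = some v := by
  induction commands with
  | nil => simp
  | cons cmd rest ih =>
    intro s v
    simp only [List.foldl_cons]
    rw [ih, chainUsed_inner_mem]
    constructor
    · rintro ((hv | ⟨t, ht, hs⟩) | ⟨c, hc, w⟩)
      · exact Or.inl hv
      · exact Or.inr ⟨cmd, by simp, t, ht, hs⟩
      · exact Or.inr ⟨c, by simp [hc], w⟩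
    · rintro (hv | ⟨c, hc, w⟩)
      · exact Or.inl (Or.inl hv)
      · rcases List.mem_cons.mp hc with rfl | hc
        · exact Or.inl (Or.inr w)
        · exact Or.inr ⟨c, hc, w⟩

lemma chainUsed_mem (commands : List (List String)) (v : Nat) :
    v ∈ chainUsed commands ↔ ∃ cmd ∈ commands, ∃ tok ∈ cmd, chainSepIndex? tok = some v := by
  rw [chainUsed, chainUsed_outer_mem]
  simp [PySem.Set.empty]

-- the two loop conditions agree
lemma chain_cond_iff (commands : List (List String)) (i : Nat) :
    (chainSepClashes ("S" ++ PySem.Int.toStr (i : Int)) commands = true) ↔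
      i ∈ chainUsed commands := by
  rw [chainSepClashes_iff, chainUsed_mem]
  constructor
  · rintro ⟨cmd, hc, hm⟩
    exact ⟨cmd, hc, _, hm, (chainSepIndex?_eq_some_iff _ i).mpr rfl⟩
  · rintro ⟨cmd, hc, tok, ht, hp⟩
    rw [chainSepIndex?_eq_some_iff] at hp
    exact ⟨cmd, hc, hp ▸ ht⟩

-- nodup and size of B's set
lemma chainUsed_inner_nodup (cmd : List String) : ∀ (s : PySem.Set Nat), s.Nodup →
    (cmd.foldl (fun used token =>
      match chainSepIndex? token with
      | some idx => PySem.Set.add used idx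
      | none => used) s).Nodup := by
  induction cmd with
  | nil => intro s hs; exact hs
  | cons tok rest ih =>
    intro s hs
    simp only [List.foldl_cons]
    cases hp : chainSepIndex? tok with
    | none => exact ih s hs
    | some idx => exact ih _ (PySem.Set.nodup_add _ _ hs)

lemma chainUsed_nodup (commands : List (List String)) : (chainUsed commands).Nodup := by
  rw [chainUsed]
  have : ∀ (s : PySem.Set Nat), s.Nodup →
      (commands.foldl (fun used cmd =>
        cmd.foldl (fun used token =>
          match chainSepIndex? token with
          | some idx => PySem.Set.add used idx
          | none => used) used) s).Nodup := by
    induction commands with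
    | nil => intro s hs; exact hs
    | cons cmd rest ih =>
      intro s hs
      simp only [List.foldl_cons]
      exact ih _ (chainUsed_inner_nodup cmd s hs)
  exact this PySem.Set.empty (by simp [PySem.Set.empty])

lemma chain_add_length (s : PySem.Set Nat) (x : Nat) :
    (PySem.Set.add s x).length ≤ s.length + 1 := by
  unfold PySem.Set.add
  split <;> simp

lemma chainUsed_inner_length (cmd : List String) : ∀ (s : PySem.Set Nat),
    (cmd.foldl (fun used token =>
      match chainSepIndex? token with
      | some idx => PySem.Set.add used idx
      | none => used) s).length ≤ s.length + cmd.length := by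
  induction cmd with
  | nil => intro s; simp
  | cons tok rest ih =>
    intro s
    simp only [List.foldl_cons, List.length_cons]
    cases hp : chainSepIndex? tok with
    | none => exact le_trans (ih s) (by omega)
    | some idx =>
      exact le_trans (ih (PySem.Set.add s idx)) (by have := chain_add_length s idx; omega)

lemma chainUsed_length (commands : List (List String)) :
    (chainUsed commands).length ≤ (commands.map List.length).sum := by
  rw [chainUsed]
  have : ∀ (s : PySem.Set Nat),
      (commands.foldl (fun used cmd =>
        cmd.foldl (fun used token =>
          match chainSepIndex? token with
          | some idx => PySem.Set.add used idx
          | none => used) used) s).length ≤ s.length + (commands.map List.length).sum := by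
    induction commands with
    | nil => intro s; simp
    | cons cmd rest ih =>
      intro s
      simp only [List.foldl_cons, List.map_cons, List.sum_cons]
      exact le_trans (ih _) (by have := chainUsed_inner_length cmd s; omega)
  simpa [PySem.Set.empty] using this PySem.Set.empty

-- pigeonhole: a nodup list of naturals misses some m ≤ its length
lemma chain_exists_not_mem (used : List Nat) (h : used.Nodup) :
    ∃ m, m ≤ used.length ∧ m ∉ used := by
  by_contra hc
  have hc' : ∀ m ≤ used.length, m ∈ used := by
    intro m hm
    by_contra hmem
    exact hc ⟨m, hm, hmem⟩
  have hsub : List.range (used.length + 1) ⊆ used := by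
    intro i hi
    rw [List.mem_range] at hi
    exact hc' i (by omega)
  have := (List.subperm_of_subset (List.nodup_range) hsub).length_le
  simp at this

-- the two while-loops, with sufficient fuel, return start + (number of consecutive hits)
lemma chainMex_eq (used : PySem.Set Nat) : ∀ (m fuel start : Nat),
    (∀ i, start ≤ i → i < start + m → used.contains i = true) →
    used.contains (start + m) = false → m < fuel →
    chainMex used fuel start = start + m := by
  intro m
  induction m with
  | zero =>
    intro fuel start _ h2 hf
    cases fuel with
    | zero => omega
    | succ f =>
      simp only [chainMex]
      rw [show start + 0 = start from rfl] at h2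
      rw [if_neg (by rw [h2]; simp)]
      omega
  | succ m ih =>
    intro fuel start h1 h2 hf
    cases fuel with
    | zero => omega
    | succ f =>
      simp only [chainMex]
      rw [if_pos (h1 start (le_refl _) (by omega))]
      rw [ih f (start + 1) (fun i hi1 hi2 => h1 i (by omega) (by omega))
        (by rw [show start + 1 + m = start + (m + 1) by omega]; exact h2) (by omega)]
      omega

lemma chainFindNum_eq (commands : List (List String)) : ∀ (m fuel start : Nat),
    (∀ i, start ≤ i → i < start + m →
      chainSepClashes ("S" ++ PySem.Int.toStr (i : Int)) commands = true) →
    chainSepClashes ("S" ++ PySem.Int.toStr ((start + m : Nat) : Int)) commands = false →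
    m < fuel →
    chainFindNum commands fuel start = start + m := by
  intro m
  induction m with
  | zero =>
    intro fuel start _ h2 hf
    cases fuel with
    | zero => omega
    | succ f =>
      simp only [chainFindNum]
      rw [show start + 0 = start from rfl] at h2
      rw [if_neg (by rw [h2]; simp)]
      omega
  | succ m ih =>
    intro fuel start h1 h2 hf
    cases fuel with
    | zero => omega
    | succ f =>
      simp only [chainFindNum]
      rw [if_pos (h1 start (le_refl _) (by omega))]
      rw [ih f (start + 1) (fun i hi1 hi2 => h1 i (by omega) (by omega))
        (by rw [show start + 1 + m = start + (m + 1) by omega]; exact h2) (by omega)]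
      omega

-- the mex itself
lemma chain_nums_eq (commands : List (List String)) :
    chainFindNum commands ((commands.map List.length).sum + 1) 0 =
      chainMex (chainUsed commands) ((chainUsed commands).length + 1) 0 := by
  set used := chainUsed commands with hused
  have hnodup : used.Nodup := chainUsed_nodup commands
  obtain ⟨w, hwlen, hw⟩ := chain_exists_not_mem used hnodup
  have hex : ∃ m, m ∉ used := ⟨w, hw⟩
  set m₀ := Nat.find hex with hm₀
  have hm₀w : m₀ ≤ w := Nat.find_min' hex hw
  have hm₀used : m₀ ∉ used := Nat.find_spec hex
  have hbelow : ∀ i, i < m₀ → i ∈ used := by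
    intro i hi
    have := Nat.find_min hex hi
    simpa using this
  have hBound : m₀ ≤ used.length := le_trans hm₀w hwlen
  have hA : chainFindNum commands ((commands.map List.length).sum + 1) 0 = 0 + m₀ := by
    apply chainFindNum_eq
    · intro i hi1 hi2
      rw [chain_cond_iff]
      exact hbelow i (by omega)
    · rw [Bool.eq_false_iff]
      intro hcl
      rw [chain_cond_iff] at hcl
      exact hm₀used (by simpa using hcl)
    · have h2 := chainUsed_length commands
      rw [← hused] at h2
      omega
  have hB : chainMex used (used.length + 1) 0 = 0 + m₀ := by
    apply chainMex_eq
    · intro i hi1 hi2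
      rw [PySem.Set.contains_iff]
      exact hbelow i (by omega)
    · rw [Bool.eq_false_iff]
      intro hcl
      rw [PySem.Set.contains_iff] at hcl
      exact hm₀used (by simpa using hcl)
    · omega
  rw [hA, hB]

-- ===== VERDICT (by name: the statement is the Claim_ definition above) =====
theorem chain_spec : Claim_equal_chain := by
  unfold Claim_equal_chain Spec_chain
  intro chain_cmd commands _
  simp only [chain, chain_alt, chain_nums_eq, List.append_assoc]
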